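-- pv_equiv track=rewrite | github.com/YYYChang/Graphic-Algorithms | Bipartite.py | BFS
-- ===== SOURCE A (Python) =====
-- def BFS(m,verticesPostMap) :
--     from collections import deque
--     dist, Q = [], deque()
--
--     for i in range(m) :
--         dist.append(-1)
--
--     for i in range(m) :
--         if dist[i] != -1 :
--             continue
--         else :
--             source = i
--             dist[source] = 0
--             Q.append(source)
--
--         while len(Q) != 0 :
--             u = Q.popleft()
--             postVertices = verticesPostMap.get(u)
--             if len(postVertices) == 0 :
--                 continue
--             for vertex in postVertices :
--                 if dist[vertex] == -1 :
--                     Q.append(vertex)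
--                     dist[vertex] = dist[u] + 1
--
--     return dist
-- ===== SOURCE B (Python) =====
-- def BFS(m, verticesPostMap):
--     dist = [-1] * m
--     for i in range(m):
--         if dist[i] != -1:
--             continue
--         dist[i] = 0
--         frontier = [i]
--         level = 0
--         while frontier:
--             nxt = []
--             for u in frontier:
--                 for v in verticesPostMap.get(u):
--                     if dist[v] == -1:
--                         dist[v] = level + 1
--                         nxt.append(v)
--             frontier = nxt
--             level += 1
--     return dist
-- ===== Notes on version B (the rewrite author's own statement) =====
-- stated objective: alternative
-- what changed: Replaces the global FIFO deque with a level-synchronous BFS: the whole current frontier list is expanded into a next-frontier list per round and distances are assigned from an explicit level counter instead of dist[u]+1 lookups.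
-- outside the precondition, e.g. on BFS(2, {0: [1, -2], 1: []}): A returns [0, 1], B returns [0, 1]
import Mathlib
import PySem

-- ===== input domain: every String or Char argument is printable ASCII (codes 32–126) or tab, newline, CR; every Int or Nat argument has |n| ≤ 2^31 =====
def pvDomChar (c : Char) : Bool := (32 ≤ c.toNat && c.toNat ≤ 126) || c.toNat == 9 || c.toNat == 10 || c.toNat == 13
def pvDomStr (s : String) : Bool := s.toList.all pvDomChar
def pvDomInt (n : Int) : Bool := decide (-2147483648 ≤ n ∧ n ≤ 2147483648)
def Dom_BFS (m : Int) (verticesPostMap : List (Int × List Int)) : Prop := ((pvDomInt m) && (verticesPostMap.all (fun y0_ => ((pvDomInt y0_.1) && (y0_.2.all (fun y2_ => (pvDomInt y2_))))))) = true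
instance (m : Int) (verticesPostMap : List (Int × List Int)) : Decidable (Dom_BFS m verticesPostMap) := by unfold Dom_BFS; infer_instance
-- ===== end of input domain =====

-- B replaces A's global FIFO deque with a level-synchronous BFS (whole-frontier rounds and an
-- explicit level counter instead of dist[u]+1 lookups); objective: alternative, not faster.

-- ===== PORT A =====
-- inner 'for vertex in postVertices' body of A (dist, Q as the pair state)
def BFSinnerA (u : Int) (sq : List Int × List Int) (vertex : Int) : List Int × List Int :=
  match PySem.List.pyGet? sq.1 vertex with
  | none => sq          -- dist[vertex] raises IndexError: excluded by Pre_BFS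
  | some d =>
    if d = -1 then
      match PySem.List.pyGet? sq.1 u with
      | none => sq      -- unreachable under Pre_BFS (u was popped, hence in range)
      | some du => (PySem.List.pySetD sq.1 vertex (du + 1), sq.2 ++ [vertex])
    else sq

-- A's 'while len(Q) != 0' loop; fuel is a termination guard only (≤ 2·m pops ever
-- happen, so fuel 2·m+2 is never exhausted on inputs satisfying Pre_BFS)
def BFSloopA (vmap : PySem.Dict Int (List Int)) : Nat → List Int → List Int → List Int
  | 0, dist, _ => dist
  | _ + 1, dist, [] => dist
  | fuel + 1, dist, u :: Q =>
    match PySem.Dict.get? vmap u with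
    | none => dist      -- Python raises TypeError on len(None): excluded by Pre_BFS
    | some postVertices =>
      if postVertices.length = 0 then BFSloopA vmap fuel dist Q
      else
        let s := postVertices.foldl (BFSinnerA u) (dist, Q)
        BFSloopA vmap fuel s.1 s.2

def BFS (m : Int) (verticesPostMap : List (Int × List Int)) : List Int :=
  let dist := (PySem.List.pyRange 0 m 1).foldl (fun d _ => d ++ [(-1 : Int)]) []
  (PySem.List.pyRange 0 m 1).foldl (fun dist i =>
    match PySem.List.pyGet? dist i with
    | none => dist
    | some di =>
      if di ≠ -1 then dist
      else BFSloopA (PySem.Dict.mk verticesPostMap) (2 * m.toNat + 2)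
             (PySem.List.pySetD dist i 0) [i]) dist

-- ===== PORT B =====
-- B's 'if dist[v] == -1: dist[v] = level + 1; nxt.append(v)' body (dist, nxt as the pair state)
def BFSrelaxB (level : Int) (s : List Int × List Int) (v : Int) : List Int × List Int :=
  match PySem.List.pyGet? s.1 v with
  | none => s           -- dist[v] raises IndexError: excluded by Pre_BFS
  | some d => if d = -1 then (PySem.List.pySetD s.1 v (level + 1), s.2 ++ [v]) else s

-- B's per-u body: 'for v in verticesPostMap.get(u)'
def BFSstepB (vmap : PySem.Dict Int (List Int)) (level : Int)
    (s : List Int × List Int) (u : Int) : List Int × List Int :=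
  match PySem.Dict.get? vmap u with
  | none => s           -- Python raises TypeError iterating None: excluded by Pre_BFS
  | some postVertices => postVertices.foldl (BFSrelaxB level) s

-- one round: expand the whole frontier into (new dist, next frontier)
def BFSroundB (vmap : PySem.Dict Int (List Int)) (level : Int)
    (dist : List Int) (frontier : List Int) : List Int × List Int :=
  frontier.foldl (BFSstepB vmap level) (dist, [])

-- B's 'while frontier' loop; same fuel-guard remark as for BFSloopA
def BFSloopB (vmap : PySem.Dict Int (List Int)) : Nat → List Int → List Int → Int → List Int
  | 0, dist, _, _ => dist
  | _ + 1, dist, [], _ => dist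
  | fuel + 1, dist, frontier, level =>
    let s := BFSroundB vmap level dist frontier
    BFSloopB vmap fuel s.1 s.2 (level + 1)

def BFS_alt (m : Int) (verticesPostMap : List (Int × List Int)) : List Int :=
  let dist := PySem.List.pyRepeat [(-1 : Int)] m
  (PySem.List.pyRange 0 m 1).foldl (fun dist i =>
    match PySem.List.pyGet? dist i with
    | none => dist
    | some di =>
      if di ≠ -1 then dist
      else BFSloopB (PySem.Dict.mk verticesPostMap) (2 * m.toNat + 2)
             (PySem.List.pySetD dist i 0) [i] 0) dist

-- ===== PRECONDITION & SPEC =====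
-- Pre_ excludes adjacency data on which A raises (a vertex of range(m) missing from the dict →
-- TypeError on len(None); a successor ≥ m → IndexError) and, slightly narrower than that,
-- negative successors, on which A survives only through Python's negative-index wraparound
-- in dist — an accident of A's list indexing (example cited in claim.json).
-- the leading 'm ≤ length' conjunct is redundant (pigeonhole: fewer than m keys cannot cover
-- range(m)) but lets 'decide' reject huge m without materializing range(m)
def Pre_BFS (m : Int) (verticesPostMap : List (Int × List Int)) : Prop :=
  (decide (m ≤ (verticesPostMap.length : Int)) &&
   (PySem.List.pyRange 0 m 1).all (fun i =>
    match PySem.Dict.get? (PySem.Dict.mk verticesPostMap) i with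
    | none => false
    | some post => post.all (fun v => decide (0 ≤ v) && decide (v < m)))) = true

instance (m : Int) (verticesPostMap : List (Int × List Int)) : Decidable (Pre_BFS m verticesPostMap) := by
  unfold Pre_BFS; infer_instance

def pvWitness_BFS : Int × (List (Int × List Int)) := (3, [(0, [1]), (1, [0, 2]), (2, [])])

def Spec_BFS (m : Int) (verticesPostMap : List (Int × List Int)) (out : List Int) : Prop :=
  out = BFS_alt m verticesPostMap
instance (m : Int) (verticesPostMap : List (Int × List Int)) (out : List Int) : Decidable (Spec_BFS m verticesPostMap out) := by
  unfold Spec_BFS; infer_instance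

-- ===== CLAIM (what is proved, stated in full; the proofs are below) =====
def Claim_equal_BFS : Prop := ∀ (m : Int) (verticesPostMap : List (Int × List Int)),
  Dom_BFS m verticesPostMap → Pre_BFS m verticesPostMap →
  Spec_BFS m verticesPostMap (BFS m verticesPostMap)

-- ===== LEMMAS AND PROOFS =====

-- number of unvisited cells (dist entries equal to -1)
def cntM1 (d : List Int) : Nat := d.countP (fun y => decide (y = -1))

theorem cntM1_le_length (d : List Int) : cntM1 d ≤ d.length := List.countP_le_length ..

theorem cntM1_set (d : List Int) (i : Nat) (x : Int) (h : i < d.length)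
    (hd : d[i] = -1) (hx : x ≠ -1) : cntM1 (d.set i x) + 1 = cntM1 d := by
  unfold cntM1
  rw [List.set_eq_take_append_cons_drop, if_pos h]
  conv_rhs => rw [← List.take_append_drop i d, List.drop_eq_getElem_cons h]
  simp [List.countP_append, hd, hx]
  omega

theorem get_set_same (d : List Int) (v x : Int) (h0 : 0 ≤ v) (h : v < (d.length : Int)) :
    PySem.List.pyGet? (PySem.List.pySetD d v x) v = some x := by
  rw [PySem.List.pySetD_of_nonneg _ _ h0, PySem.List.pyGet?_of_nonneg _ h0]
  rw [List.getElem?_set_self (by omega)]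

theorem get_set_other (d : List Int) (v w x : Int) (h0 : 0 ≤ v) (hw0 : 0 ≤ w)
    (hne : w ≠ v) : PySem.List.pyGet? (PySem.List.pySetD d v x) w = PySem.List.pyGet? d w := by
  rw [PySem.List.pySetD_of_nonneg _ _ h0, PySem.List.pyGet?_of_nonneg _ hw0,
      PySem.List.pyGet?_of_nonneg _ hw0]
  rw [List.getElem?_set_ne]
  omega

-- a cell already marked (value ≠ -1) survives one write to an unvisited cell
theorem preserve_one (d : List Int) (v w x y : Int) (h0 : 0 ≤ v)
    (hdv : PySem.List.pyGet? d v = some (-1)) (hw0 : 0 ≤ w)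
    (hwy : PySem.List.pyGet? d w = some y) (hy : y ≠ -1) :
    PySem.List.pyGet? (PySem.List.pySetD d v x) w = some y := by
  rw [get_set_other d v w x h0 hw0 ?_, hwy]
  intro h; rw [h, hdv] at hwy; exact hy (by injection hwy; omega)

-- a fold whose step only appends to the second component
theorem foldl_snd_extend {α : Type} (step : (List Int × List Int) → α → (List Int × List Int))
    (h : ∀ d q x, step (d, q) x = ((step (d, []) x).1, q ++ (step (d, []) x).2)) :
    ∀ (l : List α) (d q : List Int),
      l.foldl step (d, q) = ((l.foldl step (d, [])).1, q ++ (l.foldl step (d, [])).2) := by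
  intro l
  induction l with
  | nil => intro d q; simp
  | cons x t ih =>
    intro d q
    simp only [List.foldl_cons]
    rw [h d q x, h d [] x, List.nil_append, ih (step (d, []) x).1 (q ++ (step (d, []) x).2),
        ih (step (d, []) x).1 (step (d, []) x).2, List.append_assoc]

theorem relax_snd_extend (level : Int) (d q : List Int) (v : Int) :
    BFSrelaxB level (d, q) v = ((BFSrelaxB level (d, []) v).1, q ++ (BFSrelaxB level (d, []) v).2) := by
  unfold BFSrelaxB
  cases PySem.List.pyGet? d v with
  | none => simp
  | some x => by_cases hx : x = -1 <;> simp [hx]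

theorem stepB_snd_extend (vmap : PySem.Dict Int (List Int)) (level : Int)
    (d q : List Int) (u : Int) :
    BFSstepB vmap level (d, q) u = ((BFSstepB vmap level (d, []) u).1, q ++ (BFSstepB vmap level (d, []) u).2) := by
  unfold BFSstepB
  cases PySem.Dict.get? vmap u with
  | none => simp
  | some post => exact foldl_snd_extend _ (relax_snd_extend level) post d q

-- facts about one relax fold: length kept, appended vertices marked level+1, count bookkeeping,
-- marked cells preserved
theorem relaxFold_facts (level : Int) (hl : 0 ≤ level) :
    ∀ (post d q : List Int), (∀ v ∈ post, 0 ≤ v ∧ v < (d.length : Int)) →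
    (post.foldl (BFSrelaxB level) (d, q)).1.length = d.length ∧
    (∃ new, (post.foldl (BFSrelaxB level) (d, q)).2 = q ++ new ∧
      (∀ v ∈ new, 0 ≤ v ∧ v < (d.length : Int) ∧
        PySem.List.pyGet? (post.foldl (BFSrelaxB level) (d, q)).1 v = some (level + 1)) ∧
      cntM1 (post.foldl (BFSrelaxB level) (d, q)).1 + new.length = cntM1 d) ∧
    (∀ w y, 0 ≤ w → PySem.List.pyGet? d w = some y → y ≠ -1 →
      PySem.List.pyGet? (post.foldl (BFSrelaxB level) (d, q)).1 w = some y) := by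
  intro post
  induction post with
  | nil =>
    intro d q _
    refine ⟨rfl, ⟨[], by simp, by simp, by simp⟩, fun w y _ hw _ => hw⟩
  | cons v t ih =>
    intro d q hmem
    have hv := hmem v (List.mem_cons_self)
    have hsome := PySem.List.pyGet?_eq_some_getElem d hv.1 hv.2
    simp only [List.foldl_cons]
    by_cases h0 : d[v.toNat] = -1
    · have hstep : BFSrelaxB level (d, q) v = (PySem.List.pySetD d v (level + 1), q ++ [v]) := by
        simp only [BFSrelaxB, hsome, h0]; simp
      set d1 := PySem.List.pySetD d v (level + 1) with hd1
      have hlen1 : d1.length = d.length := by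
        rw [hd1, PySem.List.pySetD_of_nonneg _ _ hv.1]; exact List.length_set ..
      have hmem' : ∀ v' ∈ t, 0 ≤ v' ∧ v' < (d1.length : Int) := by
        intro v' hv'; rw [hlen1]; exact hmem v' (List.mem_cons_of_mem _ hv')
      obtain ⟨ihlen, ⟨new, hnew, hnewmem, hcnt⟩, ihpres⟩ := ih d1 (q ++ [v]) hmem'
      have hcellv : PySem.List.pyGet? d1 v = some (level + 1) := by
        rw [hd1]; exact get_set_same d v (level + 1) hv.1 hv.2
      have hdvneg : PySem.List.pyGet? d v = some (-1) := by rw [hsome, h0]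
      refine ⟨?_, ⟨v :: new, ?_, ?_, ?_⟩, ?_⟩
      · rw [hstep, ihlen, hlen1]
      · rw [hstep, hnew, List.append_assoc]; rfl
      · intro w hw
        rcases List.mem_cons.mp hw with hwv | hwn
        · subst hwv
          refine ⟨hv.1, hv.2, ?_⟩
          rw [hstep]
          exact ihpres w (level + 1) hv.1 hcellv (by omega)
        · have := hnewmem w hwn
          rw [hstep]; rw [hlen1] at this; exact this
      · rw [hstep]
        have hset : cntM1 d1 + 1 = cntM1 d := by
          rw [hd1, PySem.List.pySetD_of_nonneg _ _ hv.1]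
          exact cntM1_set d v.toNat (level + 1) (by omega) h0 (by omega)
        simp only [List.length_cons]
        omega
      · intro w y hw0 hwy hy
        rw [hstep]
        exact ihpres w y hw0 (preserve_one d v w (level + 1) y hv.1 hdvneg hw0 hwy hy) hy
    · have hstep : BFSrelaxB level (d, q) v = (d, q) := by
        simp only [BFSrelaxB, hsome, h0]; simp
      rw [hstep]
      exact ih d q (fun v' hv' => hmem v' (List.mem_cons_of_mem _ hv'))

-- under the loop invariant, A's inner fold (reading dist[u]) is B's relax fold (using the level)
theorem innerFoldA_eq (u level : Int) (hlev : level ≠ -1) :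
    ∀ (post d q : List Int), 0 ≤ u →
      PySem.List.pyGet? d u = some level →
      (∀ v ∈ post, 0 ≤ v ∧ v < (d.length : Int)) →
      post.foldl (BFSinnerA u) (d, q) = post.foldl (BFSrelaxB level) (d, q) := by
  intro post
  induction post with
  | nil => intro d q _ _ _; rfl
  | cons v t ih =>
    intro d q hu0 hcell hmem
    have hv := hmem v (List.mem_cons_self)
    have hsome := PySem.List.pyGet?_eq_some_getElem d hv.1 hv.2
    simp only [List.foldl_cons]
    by_cases h0 : d[v.toNat] = -1
    · have hdvneg : PySem.List.pyGet? d v = some (-1) := by rw [hsome, h0]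
      have hstepA : BFSinnerA u (d, q) v = (PySem.List.pySetD d v (level + 1), q ++ [v]) := by
        simp only [BFSinnerA, hsome, h0, hcell]; simp
      have hstepB : BFSrelaxB level (d, q) v = (PySem.List.pySetD d v (level + 1), q ++ [v]) := by
        simp only [BFSrelaxB, hsome, h0]; simp
      rw [hstepA, hstepB]
      set d1 := PySem.List.pySetD d v (level + 1) with hd1
      have hlen1 : d1.length = d.length := by
        rw [hd1, PySem.List.pySetD_of_nonneg _ _ hv.1]; exact List.length_set ..
      refine ih d1 (q ++ [v]) hu0 ?_ ?_
      · rw [hd1]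
        exact preserve_one d v u (level + 1) level hv.1 hdvneg hu0 hcell hlev
      · intro v' hv'; rw [hlen1]; exact hmem v' (List.mem_cons_of_mem _ hv')
    · have hstepA : BFSinnerA u (d, q) v = (d, q) := by
        simp only [BFSinnerA, hsome, h0]; simp
      have hstepB : BFSrelaxB level (d, q) v = (d, q) := by
        simp only [BFSrelaxB, hsome, h0]; simp
      rw [hstepA, hstepB]
      exact ih d q hu0 hcell (fun v' hv' => hmem v' (List.mem_cons_of_mem _ hv'))

-- the queue lemma: running A's loop through one whole level equals one B round
theorem loopA_round (vmap : PySem.Dict Int (List Int)) (level : Int) (hl : 0 ≤ level) :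
    ∀ (F d R : List Int) (fuel : Nat),
      (∀ i : Int, 0 ≤ i → i < (d.length : Int) → ∃ post, PySem.Dict.get? vmap i = some post ∧
        ∀ v ∈ post, 0 ≤ v ∧ v < (d.length : Int)) →
      (∀ u ∈ F, 0 ≤ u ∧ u < (d.length : Int) ∧ PySem.List.pyGet? d u = some level) →
      F.length ≤ fuel →
      BFSloopA vmap fuel d (F ++ R) =
        BFSloopA vmap (fuel - F.length) (BFSroundB vmap level d F).1 (R ++ (BFSroundB vmap level d F).2) ∧
      (BFSroundB vmap level d F).1.length = d.length ∧
      (∀ v ∈ (BFSroundB vmap level d F).2, 0 ≤ v ∧ v < (d.length : Int) ∧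
        PySem.List.pyGet? (BFSroundB vmap level d F).1 v = some (level + 1)) ∧
      cntM1 (BFSroundB vmap level d F).1 + (BFSroundB vmap level d F).2.length = cntM1 d ∧
      (∀ w y, 0 ≤ w → PySem.List.pyGet? d w = some y → y ≠ -1 →
        PySem.List.pyGet? (BFSroundB vmap level d F).1 w = some y) := by
  intro F
  induction F with
  | nil =>
    intro d R fuel _ _ _
    refine ⟨by simp [BFSroundB], by simp [BFSroundB], by simp [BFSroundB], by simp [BFSroundB],
      fun w y _ hw _ => by simpa [BFSroundB] using hw⟩
  | cons u F' ih =>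
    intro d R fuel hGood hF hfuel
    obtain ⟨fa, rfl⟩ : ∃ fa, fuel = fa + 1 := ⟨fuel - 1, by simp at hfuel; omega⟩
    have hu := hF u (List.mem_cons_self)
    obtain ⟨post, hpost, hpostmem⟩ := hGood u hu.1 hu.2.1
    -- A pops u; its inner fold over post equals B's relax fold
    have hinner : post.foldl (BFSinnerA u) (d, F' ++ R) =
        post.foldl (BFSrelaxB level) (d, F' ++ R) :=
      innerFoldA_eq u level (by omega) post d (F' ++ R) hu.1 hu.2.2 hpostmem
    have hsplit := foldl_snd_extend (BFSrelaxB level) (relax_snd_extend level) post d (F' ++ R)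
    set D1 := (post.foldl (BFSrelaxB level) (d, [])).1 with hD1
    set New1 := (post.foldl (BFSrelaxB level) (d, [])).2 with hNew1
    obtain ⟨hlen1, ⟨new, hnew, hnewmem, hcnt1⟩, hpres1⟩ :=
      relaxFold_facts level hl post d [] hpostmem
    have hnew' : New1 = new := by rw [← hNew1] at hnew; simpa using hnew
    -- A's one pop step
    have hstepA : BFSloopA vmap (fa + 1) d ((u :: F') ++ R) =
        BFSloopA vmap fa D1 (F' ++ (R ++ New1)) := by
      show BFSloopA vmap (fa + 1) d (u :: (F' ++ R)) = _
      rw [BFSloopA]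
      rw [hpost]
      by_cases hplen : post.length = 0
      · have hpnil : post = [] := List.length_eq_zero_iff.mp hplen
        subst hpnil
        simp [hD1, hNew1]
      · simp only [if_neg hplen, hinner, hsplit, ← List.append_assoc]
    -- invariants for the tail F'
    have hGood1 : ∀ i : Int, 0 ≤ i → i < (D1.length : Int) → ∃ p, PySem.Dict.get? vmap i = some p ∧
        ∀ v ∈ p, 0 ≤ v ∧ v < (D1.length : Int) := by
      rw [hlen1]; exact hGood
    have hF1 : ∀ u' ∈ F', 0 ≤ u' ∧ u' < (D1.length : Int) ∧
        PySem.List.pyGet? D1 u' = some level := by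
      intro u' hu'
      have h := hF u' (List.mem_cons_of_mem _ hu')
      exact ⟨h.1, by rw [hlen1]; exact h.2.1, hpres1 u' level h.1 h.2.2 (by omega)⟩
    obtain ⟨ihA, ihlen, ihmem, ihcnt, ihpres⟩ := ih D1 (R ++ New1) fa hGood1 hF1 (by simpa using hfuel)
    -- the round on u :: F' decomposes
    have hround : BFSroundB vmap level d (u :: F') =
        ((BFSroundB vmap level D1 F').1, New1 ++ (BFSroundB vmap level D1 F').2) := by
      show (u :: F').foldl (BFSstepB vmap level) (d, []) = _
      rw [List.foldl_cons]
      have hstep1 : BFSstepB vmap level (d, []) u = (D1, New1) := by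
        simp only [BFSstepB, hpost, hD1, hNew1]
      rw [hstep1]
      have := foldl_snd_extend (BFSstepB vmap level) (stepB_snd_extend vmap level) F' D1 New1
      simpa [BFSroundB] using this
    set S := BFSroundB vmap level D1 F' with hS
    rw [hround]
    refine ⟨?_, ?_, ?_, ?_, ?_⟩
    · rw [hstepA, ihA]
      simp only [List.length_cons]
      have : fa - F'.length = fa + 1 - (F'.length + 1) := by omega
      rw [← this, List.append_assoc]
    · have hlen1' : D1.length = d.length := by rw [hD1]; exact hlen1
      exact ihlen.trans hlen1'
    · intro v hv
      rcases List.mem_append.mp hv with hv1 | hv2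
      · rw [hnew'] at hv1
        have h := hnewmem v hv1
        refine ⟨h.1, h.2.1, ?_⟩
        exact ihpres v (level + 1) h.1 (by rw [hD1]; exact h.2.2) (by omega)
      · have h := ihmem v hv2
        have hlen1' : D1.length = d.length := by rw [hD1]; exact hlen1
        exact ⟨h.1, by rw [← hlen1']; exact h.2.1, h.2.2⟩
    · have hcnt1' : cntM1 D1 + New1.length = cntM1 d := by rw [hnew']; exact hcnt1
      simp only [List.length_append]
      omega
    · intro w y hw0 hwy hy
      exact ihpres w y hw0 (hpres1 w y hw0 hwy hy) hy

theorem loopA_nil (vmap : PySem.Dict Int (List Int)) (fuel : Nat) (d : List Int) :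
    BFSloopA vmap fuel d [] = d := by cases fuel <;> rfl

-- main loop equivalence
theorem loopA_eq_loopB (vmap : PySem.Dict Int (List Int)) :
    ∀ (fuelB : Nat) (level : Int) (d F : List Int) (fuelA : Nat),
      0 ≤ level →
      (∀ i : Int, 0 ≤ i → i < (d.length : Int) → ∃ post, PySem.Dict.get? vmap i = some post ∧
        ∀ v ∈ post, 0 ≤ v ∧ v < (d.length : Int)) →
      (∀ u ∈ F, 0 ≤ u ∧ u < (d.length : Int) ∧ PySem.List.pyGet? d u = some level) →
      F.length + cntM1 d ≤ fuelA →
      (cntM1 d < fuelB ∨ F = []) →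
      BFSloopA vmap fuelA d F = BFSloopB vmap fuelB d F level ∧
      (BFSloopB vmap fuelB d F level).length = d.length := by
  intro fuelB
  induction fuelB with
  | zero =>
    intro level d F fuelA _ _ _ _ hB
    have hF : F = [] := by rcases hB with h | h; exacts [absurd h (by omega), h]
    subst hF
    exact ⟨loopA_nil vmap fuelA d, by cases fuelA <;> rfl⟩
  | succ fb ih =>
    intro level d F fuelA hl hGood hF hfA hfB
    cases F with
    | nil => exact ⟨loopA_nil vmap fuelA d, rfl⟩
    | cons u F' =>
      obtain ⟨hA, hlen, hmem, hcnt, _⟩ :=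
        loopA_round vmap level hl (u :: F') d [] fuelA hGood hF (by simp at hfA ⊢; omega)
      rw [List.append_nil] at hA
      set S := BFSroundB vmap level d (u :: F') with hS
      have hBstep : BFSloopB vmap (fb + 1) d (u :: F') level =
          BFSloopB vmap fb S.1 S.2 (level + 1) := by
        rw [BFSloopB]
        exact fun h => List.cons_ne_nil u F' h
      have hGood1 : ∀ i : Int, 0 ≤ i → i < (S.1.length : Int) → ∃ p, PySem.Dict.get? vmap i = some p ∧
          ∀ v ∈ p, 0 ≤ v ∧ v < (S.1.length : Int) := by rw [hlen]; exact hGood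
      have hF1 : ∀ v ∈ S.2, 0 ≤ v ∧ v < (S.1.length : Int) ∧
          PySem.List.pyGet? S.1 v = some (level + 1) := by
        intro v hv; have h := hmem v hv; exact ⟨h.1, by rw [hlen]; exact h.2.1, h.2.2⟩
      have hfB' : cntM1 d < fb + 1 := by
        rcases hfB with h | h; exacts [h, absurd h (List.cons_ne_nil u F')]
      obtain ⟨ih1, ih2⟩ := ih (level + 1) S.1 S.2 (fuelA - (u :: F').length) (by omega) hGood1 hF1
        (by omega)
        (by
          by_cases hS2 : S.2 = []
          · right; exact hS2
          · left; have : 1 ≤ S.2.length := by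
              cases hS2e : S.2 with
              | nil => exact absurd hS2e hS2
              | cons a b => simp
            omega)
      refine ⟨?_, ?_⟩
      · rw [hA, hBstep, List.nil_append, ih1]
      · rw [hBstep, ih2, hlen]

-- the outer 'for i in range(m)' loops agree, invariant: dist keeps length m
theorem outer_eq (m : Int) (vmap : PySem.Dict Int (List Int))
    (hGood : ∀ i : Int, 0 ≤ i → i < m → ∃ post, PySem.Dict.get? vmap i = some post ∧
      ∀ v ∈ post, 0 ≤ v ∧ v < m) :
    ∀ (l : List Int), (∀ i ∈ l, 0 ≤ i ∧ i < m) → ∀ (d : List Int), d.length = m.toNat →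
    l.foldl (fun dist i =>
      match PySem.List.pyGet? dist i with
      | none => dist
      | some di => if di ≠ -1 then dist
        else BFSloopA vmap (2 * m.toNat + 2) (PySem.List.pySetD dist i 0) [i]) d
    = l.foldl (fun dist i =>
      match PySem.List.pyGet? dist i with
      | none => dist
      | some di => if di ≠ -1 then dist
        else BFSloopB vmap (2 * m.toNat + 2) (PySem.List.pySetD dist i 0) [i] 0) d := by
  intro l
  induction l with
  | nil => intro _ d _; rfl
  | cons i t ih =>
    intro hmem d hdlen
    have hi := hmem i (List.mem_cons_self)
    have hm0 : 0 < m := by omega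
    have hilen : i < (d.length : Int) := by omega
    have hget := PySem.List.pyGet?_eq_some_getElem d hi.1 hilen
    simp only [List.foldl_cons, hget]
    by_cases hdi : d[i.toNat] = -1
    · simp only [hdi, if_neg (by omega : ¬ (-1 : Int) ≠ -1)]
      set d1 := PySem.List.pySetD d i 0 with hd1
      have hlen1 : d1.length = d.length := by
        rw [hd1, PySem.List.pySetD_of_nonneg _ _ hi.1]; exact List.length_set ..
      have hmInt : ((m.toNat : Int)) = m := by omega
      have hGood1 : ∀ j : Int, 0 ≤ j → j < (d1.length : Int) → ∃ p, PySem.Dict.get? vmap j = some p ∧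
          ∀ v ∈ p, 0 ≤ v ∧ v < (d1.length : Int) := by
        intro j hj0 hj
        obtain ⟨p, hp, hpv⟩ := hGood j hj0 (by omega)
        exact ⟨p, hp, fun v hv => ⟨(hpv v hv).1, by have := (hpv v hv).2; omega⟩⟩
      have hF1 : ∀ u ∈ [i], 0 ≤ u ∧ u < (d1.length : Int) ∧
          PySem.List.pyGet? d1 u = some 0 := by
        intro u hu
        have hui : u = i := by simpa using hu
        rw [hui]
        exact ⟨hi.1, by omega, get_set_same d i 0 hi.1 hilen⟩
      obtain ⟨heq, hlenB⟩ := loopA_eq_loopB vmap (2 * m.toNat + 2) 0 d1 [i] (2 * m.toNat + 2)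
        le_rfl hGood1 hF1
        (by have := cntM1_le_length d1; simp; omega)
        (Or.inl (by have := cntM1_le_length d1; omega))
      rw [heq]
      exact ih (fun j hj => hmem j (List.mem_cons_of_mem _ hj)) _ (by rw [hlenB, hlen1, hdlen])
    · simp only [if_pos hdi]
      exact ih (fun j hj => hmem j (List.mem_cons_of_mem _ hj)) d hdlen

-- ===== VERDICT (by name: the statement is the Claim_ definition above) =====
theorem BFS_spec : Claim_equal_BFS := by
  unfold Claim_equal_BFS Spec_BFS
  intro m vpm _ hpre
  unfold BFS BFS_alt
  have hinit : (PySem.List.pyRange 0 m 1).foldl (fun d _ => d ++ [(-1 : Int)]) [] =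
      PySem.List.pyRepeat [(-1 : Int)] m := by
    rw [PySem.List.pyRepeat_singleton,
        PySem.List.foldl_append_singleton_eq_map (fun _ => (-1 : Int))]
    simp [pysem, List.map_const']
  rw [hinit]
  have hGood : ∀ i : Int, 0 ≤ i → i < m → ∃ post,
      PySem.Dict.get? (PySem.Dict.mk vpm) i = some post ∧ ∀ v ∈ post, 0 ≤ v ∧ v < m := by
    intro i h0 hm
    unfold Pre_BFS at hpre
    rw [Bool.and_eq_true] at hpre
    replace hpre := hpre.2
    rw [List.all_eq_true] at hpre
    have := hpre i (PySem.List.mem_pyRange_one.mpr ⟨h0, hm⟩)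
    cases hgi : PySem.Dict.get? (PySem.Dict.mk vpm) i with
    | none => rw [hgi] at this; simp at this
    | some post =>
      rw [hgi] at this
      refine ⟨post, rfl, fun v hv => ?_⟩
      rw [List.all_eq_true] at this
      have := this v hv
      simp at this
      exact this
  exact outer_eq m (PySem.Dict.mk vpm) hGood (PySem.List.pyRange 0 m 1)
    (fun i hi => PySem.List.mem_pyRange_one.mp hi)
    (PySem.List.pyRepeat [(-1 : Int)] m)
    (by rw [PySem.List.pyRepeat_singleton]; simp)
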